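-- pv_equiv track=rewrite | github.com/Artreko/ExpressionsCompiler | lexemes_tree.py | get_all_lexemes_list
-- ===== SOURCE A (Python) =====
-- OPERATORS = ['=', '/', '*', '+', '-', '^']
--
-- def get_all_lexemes_list(expr):
--     symbols = [s for s in expr]
--     words = [""]
--     current_word_idx = 0
--     for el in symbols:
--         if el in ' ':
--             if words[current_word_idx]:
--                 words.append("")
--                 current_word_idx += 1
--         elif el in OPERATORS + ['(', ')']:
--             if words[current_word_idx]:
--                 current_word_idx += 1
--                 words.append("")
--             words[current_word_idx] += el
--             words.append("")
--             current_word_idx += 1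
--         else:
--             words[current_word_idx] += el
--     if not words[-1]:
--         words.pop()
--     return words
-- ===== SOURCE B (Python) =====
-- import re
--
-- # Regex tokenizer: one findall pass — each match is either a single
-- # operator/parenthesis or a maximal run of non-space non-operator characters.
-- _TOKEN = re.compile(r'[=/*+^()-]|[^ =/*+^()-]+')
--
-- def get_all_lexemes_list(expr):
--     return _TOKEN.findall(expr)
-- ===== Notes on version B (the rewrite author's own statement) =====
-- stated objective: faster
-- what changed: Replaces the manual words-list/index character loop with a single regex findall whose pattern matches one operator/parenthesis or a maximal run of non-space non-operator characters.
import Mathlib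
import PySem

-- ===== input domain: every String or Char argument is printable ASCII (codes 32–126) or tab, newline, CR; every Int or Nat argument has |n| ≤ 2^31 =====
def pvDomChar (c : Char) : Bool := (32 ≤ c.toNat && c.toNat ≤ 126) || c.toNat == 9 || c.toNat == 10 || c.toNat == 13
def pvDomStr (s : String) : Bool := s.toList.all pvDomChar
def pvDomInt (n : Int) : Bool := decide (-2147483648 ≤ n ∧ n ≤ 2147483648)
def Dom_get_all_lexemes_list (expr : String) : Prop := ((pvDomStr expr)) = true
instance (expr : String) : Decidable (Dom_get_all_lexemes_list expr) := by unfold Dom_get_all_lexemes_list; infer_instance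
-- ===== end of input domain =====

-- B replaces A's manual words-list/index loop (quadratic string concatenation) by a
-- regex findall tokenizer: one operator char or a maximal run of word chars per token.

-- ===== PORT A =====
def pvOPERATORS : List String := ["=", "/", "*", "+", "-", "^"]

-- one iteration of A's for-loop; state = (words, current_word_idx).
-- words[current_word_idx] is always in range, so getD/set are exact here.
def pvStepA : List String × Nat → Char → List String × Nat
  | (words, idx), el =>
    if String.ofList [el] ∈ (" ".toList.map (fun c => String.ofList [c])) then
      -- 'el in " "' : el equals the space character
      if words.getD idx "" ≠ "" then (words ++ [""], idx + 1) else (words, idx)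
    else if String.ofList [el] ∈ pvOPERATORS ++ ["(", ")"] then
      let wi := if words.getD idx "" ≠ "" then (words ++ [""], idx + 1) else (words, idx)
      (wi.1.set wi.2 (wi.1.getD wi.2 "" ++ String.ofList [el]) ++ [""], wi.2 + 1)
    else
      (words.set idx (words.getD idx "" ++ String.ofList [el]), idx)

def get_all_lexemes_list (expr : String) : List String :=
  let symbols := expr.toList
  let st := symbols.foldl pvStepA ([""], 0)
  let words := st.1
  -- 'if not words[-1]: words.pop()'
  if words.getLastD "" = "" then words.dropLast else words

-- ===== PORT B =====
def pvIsOpChar (c : Char) : Bool := c ∈ ['=', '/', '*', '+', '^', '(', ')', '-']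

def pvIsWordChar (c : Char) : Bool := !pvIsOpChar c && c ≠ ' '

-- the regex r'[=/*+^()-]|[^ =/*+^()-]+' scanned left to right, non-overlapping:
-- a single operator char, or a maximal run of word chars; spaces match nothing.
def pvScanB : List Char → List String
  | [] => []
  | c :: r =>
    if pvIsOpChar c then String.ofList [c] :: pvScanB r
    else if c = ' ' then pvScanB r
    else String.ofList (c :: r.takeWhile pvIsWordChar) :: pvScanB (r.dropWhile pvIsWordChar)
  termination_by l => l.length
  decreasing_by
    · simp
    · simp
    · simp only [List.length_cons]
      exact Nat.lt_succ_of_le (List.length_dropWhile_le _ _)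

def get_all_lexemes_list_alt (expr : String) : List String :=
  pvScanB expr.toList

-- ===== PRECONDITION & SPEC =====
def Spec_get_all_lexemes_list (expr : String) (out : List String) : Prop := out = get_all_lexemes_list_alt expr
instance (expr : String) (out : List String) : Decidable (Spec_get_all_lexemes_list expr out) := by unfold Spec_get_all_lexemes_list; infer_instance

-- ===== CLAIM (what is proved, stated in full; the proofs are below) =====
def Claim_equal_get_all_lexemes_list : Prop := ∀ (expr : String), Dom_get_all_lexemes_list expr → Spec_get_all_lexemes_list expr (get_all_lexemes_list expr)

-- ===== LEMMAS AND PROOFS =====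

-- abstract description of A's loop tail: the words produced from the current word
-- `cur` and the remaining characters (last element = word still in progress).
def pvTailA (cur : String) : List Char → List String
  | [] => [cur]
  | c :: r =>
    if String.ofList [c] ∈ (" ".toList.map (fun x => String.ofList [x])) then
      if cur ≠ "" then cur :: pvTailA "" r else pvTailA cur r
    else if String.ofList [c] ∈ pvOPERATORS ++ ["(", ")"] then
      if cur ≠ "" then cur :: String.ofList [c] :: pvTailA "" r
      else String.ofList [c] :: pvTailA "" r
    else pvTailA (cur ++ String.ofList [c]) r

-- drop a trailing empty word (A's final 'if not words[-1]: pop')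
def pvPopE (ws : List String) : List String :=
  if ws.getLastD "" = "" then ws.dropLast else ws

theorem pvOfList_nil : String.ofList ([] : List Char) = "" := rfl

theorem pvOfList_inj (a b : List Char) : String.ofList a = String.ofList b ↔ a = b := by
  constructor
  · intro h; have := congrArg String.toList h; simpa [String.toList_ofList] using this
  · intro h; rw [h]

theorem pvOfList_ne_empty (c : Char) (l : List Char) : String.ofList (c :: l) ≠ "" := by
  intro h
  have := congrArg String.toList h
  simp [String.toList_ofList] at this

theorem pvTailA_ne_nil (rest : List Char) (cur : String) : pvTailA cur rest ≠ [] := by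
  induction rest generalizing cur with
  | nil => simp [pvTailA]
  | cons c r ih => simp only [pvTailA]; split_ifs <;> simp [ih]

theorem pvGetD_append_len (done : List String) (cur : String) :
    (done ++ [cur]).getD done.length "" = cur := by
  simp [List.getD, List.getElem?_append_right]

theorem pvSet_append_len (done : List String) (cur x : String) :
    (done ++ [cur]).set done.length x = done ++ [x] := by
  induction done with
  | nil => simp
  | cons d ds ih => simp [List.set, ih]

-- A's fold, started on any (done ++ [cur], done.length), only ever touches the tail.
theorem pvFoldA_eq_tail (rest : List Char) (done : List String) (cur : String) :
    rest.foldl pvStepA (done ++ [cur], done.length)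
      = (done ++ pvTailA cur rest,
         done.length + (pvTailA cur rest).length - 1) := by
  induction rest generalizing done cur with
  | nil => simp [pvTailA]
  | cons c r ih =>
    rw [List.foldl_cons]
    by_cases h1 : String.ofList [c] ∈ (" ".toList.map (fun x => String.ofList [x]))
    · by_cases h2 : cur ≠ ""
      · have hstep : pvStepA (done ++ [cur], done.length) c
            = ((done ++ [cur]) ++ [""], done.length + 1) := by
          simp only [pvStepA]
          rw [if_pos h1, if_pos (by rw [pvGetD_append_len]; exact h2)]
        have ht : pvTailA cur (c :: r) = cur :: pvTailA "" r := by
          simp only [pvTailA]; rw [if_pos h1, if_pos h2]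
        have hi := ih (done ++ [cur]) ""
        rw [show (done ++ [cur]).length = done.length + 1 by simp] at hi
        rw [hstep, hi, ht]
        have hpos := List.length_pos_iff.mpr (pvTailA_ne_nil r "")
        simp only [Prod.mk.injEq, List.append_assoc, List.singleton_append, List.length_cons]
        exact ⟨by simp, by omega⟩
      · push_neg at h2
        have hstep : pvStepA (done ++ [cur], done.length) c = (done ++ [cur], done.length) := by
          simp only [pvStepA]
          rw [if_pos h1, if_neg (by rw [pvGetD_append_len]; simp [h2])]
        have ht : pvTailA cur (c :: r) = pvTailA cur r := by
          simp only [pvTailA]; rw [if_pos h1, if_neg (by simp [h2])]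
        rw [hstep, ht]; exact ih done cur
    · by_cases h3 : String.ofList [c] ∈ pvOPERATORS ++ ["(", ")"]
      · by_cases h2 : cur ≠ ""
        · have e1 : ((done ++ [cur]) ++ [""]).getD (done.length + 1) "" = "" := by
            rw [show done.length + 1 = (done ++ [cur]).length by simp, pvGetD_append_len]
          have e2 : ∀ x, ((done ++ [cur]) ++ [""]).set (done.length + 1) x
              = (done ++ [cur]) ++ [x] := by
            intro x
            rw [show done.length + 1 = (done ++ [cur]).length by simp, pvSet_append_len]
          have hstep : pvStepA (done ++ [cur], done.length) c
              = (((done ++ [cur]) ++ ["" ++ String.ofList [c]]) ++ [""], done.length + 2) := by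
            simp only [pvStepA]
            rw [if_neg h1, if_pos h3, if_pos (by rw [pvGetD_append_len]; exact h2)]
            simp only [e1, e2]
          have ht : pvTailA cur (c :: r) = cur :: String.ofList [c] :: pvTailA "" r := by
            simp only [pvTailA]; rw [if_neg h1, if_pos h3, if_pos h2]
          have hi := ih ((done ++ [cur]) ++ ["" ++ String.ofList [c]]) ""
          rw [show ((done ++ [cur]) ++ ["" ++ String.ofList [c]]).length = done.length + 2
                by simp] at hi
          rw [hstep, hi, ht]
          have hpos := List.length_pos_iff.mpr (pvTailA_ne_nil r "")
          simp only [Prod.mk.injEq, List.append_assoc, List.singleton_append,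
            List.cons_append, List.nil_append, List.length_cons]
          constructor
          · simp
          · omega
        · push_neg at h2
          subst h2
          have hstep : pvStepA (done ++ [""], done.length) c
              = ((done ++ ["" ++ String.ofList [c]]) ++ [""], done.length + 1) := by
            simp only [pvStepA]
            rw [if_neg h1, if_pos h3, if_neg (by rw [pvGetD_append_len]; simp)]
            simp only [pvGetD_append_len, pvSet_append_len]
          have ht : pvTailA "" (c :: r) = String.ofList [c] :: pvTailA "" r := by
            simp only [pvTailA]; rw [if_neg h1, if_pos h3, if_neg (by simp)]
          have hi := ih (done ++ ["" ++ String.ofList [c]]) ""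
          rw [show (done ++ ["" ++ String.ofList [c]]).length = done.length + 1 by simp] at hi
          rw [hstep, hi, ht]
          have hpos := List.length_pos_iff.mpr (pvTailA_ne_nil r "")
          simp only [Prod.mk.injEq, List.append_assoc, List.singleton_append, List.length_cons]
          constructor
          · simp
          · omega
      · have hstep : pvStepA (done ++ [cur], done.length) c
            = (done ++ [cur ++ String.ofList [c]], done.length) := by
          simp only [pvStepA]
          rw [if_neg h1, if_neg h3, pvGetD_append_len, pvSet_append_len]
        have ht : pvTailA cur (c :: r) = pvTailA (cur ++ String.ofList [c]) r := by
          simp only [pvTailA]; rw [if_neg h1, if_neg h3]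
        rw [hstep, ht]; exact ih done (cur ++ String.ofList [c])

theorem pvPopE_cons (a : String) (l : List String) (h : l ≠ []) :
    pvPopE (a :: l) = a :: pvPopE l := by
  unfold pvPopE
  have hg : (a :: l).getLastD "" = l.getLastD "" := by
    cases l with
    | nil => simp at h
    | cons x xs => simp [List.getLastD]
  rw [hg, List.dropLast_cons_of_ne_nil h]
  split_ifs <;> rfl

theorem pvScanB_nil : pvScanB [] = [] := by rw [pvScanB]

theorem pvScanB_cons (c : Char) (r : List Char) :
    pvScanB (c :: r)
      = if pvIsOpChar c then String.ofList [c] :: pvScanB r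
        else if c = ' ' then pvScanB r
        else String.ofList (c :: r.takeWhile pvIsWordChar)
              :: pvScanB (r.dropWhile pvIsWordChar) := by
  rw [pvScanB]

theorem pvMemSpace (c : Char) :
    (String.ofList [c] ∈ (" ".toList.map (fun x => String.ofList [x]))) ↔ c = ' ' := by
  have h : " ".toList = [' '] := rfl
  rw [h]
  simp only [List.map_cons, List.map_nil, List.mem_cons, List.not_mem_nil, or_false,
    pvOfList_inj, List.cons.injEq, and_true]

theorem pvMemOps (c : Char) :
    (String.ofList [c] ∈ pvOPERATORS ++ ["(", ")"]) ↔ pvIsOpChar c = true := by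
  have h : pvOPERATORS ++ ["(", ")"]
      = [String.ofList ['='], String.ofList ['/'], String.ofList ['*'], String.ofList ['+'],
         String.ofList ['-'], String.ofList ['^'], String.ofList ['('], String.ofList [')']] := rfl
  rw [h]
  simp only [List.mem_cons, List.not_mem_nil, or_false, pvOfList_inj, List.cons.injEq, and_true]
  simp only [pvIsOpChar, List.mem_cons, List.not_mem_nil, or_false, decide_eq_true_eq]
  tauto

-- main bridge: A's tail, with a trailing empty word dropped, is B's scan; a
-- nonempty current word absorbs the leading word-char run of the rest.
theorem pvTail_scan (rest : List Char) (cur : List Char) :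
    pvPopE (pvTailA (String.ofList cur) rest)
      = if cur = [] then pvScanB rest
        else String.ofList (cur ++ rest.takeWhile pvIsWordChar)
              :: pvScanB (rest.dropWhile pvIsWordChar) := by
  induction rest generalizing cur with
  | nil =>
    cases cur with
    | nil => simp [pvTailA, pvPopE, pvScanB_nil, pvOfList_nil]
    | cons a l => simp [pvTailA, pvPopE, pvOfList_ne_empty a l, pvScanB_nil]
  | cons c r ih =>
    have ihe : pvPopE (pvTailA "" r) = pvScanB r := by
      have h0 := ih []
      rwa [pvOfList_nil, if_pos rfl] at h0
    by_cases hsp : c = ' '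
    · subst hsp
      have hop : pvIsOpChar ' ' = false := by decide
      have hvw : pvIsWordChar ' ' = false := by decide
      simp only [pvTailA, if_pos ((pvMemSpace ' ').mpr rfl)]
      cases cur with
      | nil =>
        rw [pvOfList_nil, if_neg (by simp), ihe, if_pos rfl]
        simp [pvScanB_cons, hop]
      | cons a l =>
        rw [if_pos (pvOfList_ne_empty a l)]
        rw [pvPopE_cons _ _ (pvTailA_ne_nil r ""), ihe, if_neg (by simp)]
        simp [List.takeWhile_cons, List.dropWhile_cons, hvw, pvScanB_cons, hop]
    · by_cases hop : pvIsOpChar c = true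
      · have hvw : pvIsWordChar c = false := by simp [pvIsWordChar, hop]
        simp only [pvTailA, if_neg (fun hm => hsp ((pvMemSpace c).mp hm)),
          if_pos ((pvMemOps c).mpr hop)]
        cases cur with
        | nil =>
          rw [pvOfList_nil, if_neg (by simp)]
          rw [pvPopE_cons _ _ (pvTailA_ne_nil r ""), ihe, if_pos rfl]
          simp [pvScanB_cons, hop]
        | cons a l =>
          rw [if_pos (pvOfList_ne_empty a l)]
          rw [pvPopE_cons _ _ (List.cons_ne_nil _ _), pvPopE_cons _ _ (pvTailA_ne_nil r ""), ihe,
            if_neg (by simp)]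
          simp [List.takeWhile_cons, List.dropWhile_cons, hvw, pvScanB_cons, hop]
      · have hvw : pvIsWordChar c = true := by simp [pvIsWordChar, hop, hsp]
        simp only [pvTailA, if_neg (fun hm => hsp ((pvMemSpace c).mp hm)),
          if_neg (fun hm => hop ((pvMemOps c).mp hm))]
        rw [show String.ofList cur ++ String.ofList [c] = String.ofList (cur ++ [c]) by
              rw [String.ofList_append]]
        rw [ih (cur ++ [c]), if_neg (by simp)]
        cases cur with
        | nil =>
          rw [if_pos rfl]
          simp [pvScanB_cons, hop, hsp, List.takeWhile_cons, List.dropWhile_cons, hvw]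
        | cons a l =>
          rw [if_neg (by simp)]
          simp [List.takeWhile_cons, List.dropWhile_cons, hvw]

-- ===== VERDICT (by name: the statement is the Claim_ definition above) =====
theorem get_all_lexemes_list_spec : Claim_equal_get_all_lexemes_list := by
  intro expr _
  unfold Spec_get_all_lexemes_list get_all_lexemes_list get_all_lexemes_list_alt
  have h := pvFoldA_eq_tail expr.toList [] ""
  simp only [List.nil_append, List.length_nil] at h
  show (if ((expr.toList.foldl pvStepA ([""], 0)).1).getLastD "" = ""
          then ((expr.toList.foldl pvStepA ([""], 0)).1).dropLast
          else (expr.toList.foldl pvStepA ([""], 0)).1) = pvScanB expr.toList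
  rw [h]
  have h2 := pvTail_scan expr.toList []
  rw [pvOfList_nil, if_pos rfl] at h2
  simpa [pvPopE] using h2
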